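-- pv_equiv track=rewrite | github.com/behej/AdventOfCode | 2021/day20/part1.py | convert_dots_and_hashtags_to_index
-- ===== SOURCE A (Python) =====
-- def convert_dots_and_hashtags_to_index(ar):
-- 	idx = 0
--
-- 	for i in range(len(ar)):
-- 		if i == 0:
-- 			idx += (1 if ar[-1-i] == "#" else 0)
-- 		else:
-- 			idx += (2 if ar[-1-i] == "#" else 0) ** i
--
-- 	return idx
-- ===== SOURCE B (Python) =====
-- def convert_dots_and_hashtags_to_index(ar):
--     return int('0' + ''.join('1' if c == '#' else '0' for c in ar), 2)
-- ===== Notes on version B (the rewrite author's own statement) =====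
-- stated objective: idiomatic
-- what changed: Replaces the backward-indexed loop summing per-position powers of two with building a binary digit string ('#'->'1', else '0', with a '0' prefix for the empty case) parsed once via int(_, 2).
import Mathlib
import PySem

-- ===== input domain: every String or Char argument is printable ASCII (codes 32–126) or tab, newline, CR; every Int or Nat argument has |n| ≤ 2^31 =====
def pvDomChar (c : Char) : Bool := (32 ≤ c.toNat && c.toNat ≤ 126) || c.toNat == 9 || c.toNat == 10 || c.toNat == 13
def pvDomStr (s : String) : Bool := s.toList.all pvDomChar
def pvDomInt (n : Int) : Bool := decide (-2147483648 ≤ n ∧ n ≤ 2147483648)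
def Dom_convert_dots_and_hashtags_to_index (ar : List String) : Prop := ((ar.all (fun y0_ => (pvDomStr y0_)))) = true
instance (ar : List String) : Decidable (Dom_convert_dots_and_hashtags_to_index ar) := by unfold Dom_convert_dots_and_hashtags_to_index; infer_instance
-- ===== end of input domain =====

-- B replaces A's backward-indexed power-of-two summation loop by building the binary digit
-- sequence ('#'→'1', else '0', with a '0' prefix for the empty case) and parsing it once in
-- base 2 (objective: idiomatic; a timing run measured B as faster by a constant factor).

-- ===== PORT A =====
-- the index -1-i is always in range for i in range(len(ar)), so getD "" is never taken
def convert_dots_and_hashtags_to_index (ar : List String) : Int :=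
  (PySem.List.pyRange 0 ar.length 1).foldl (fun idx i =>
    if i == 0 then
      idx + (if (PySem.List.pyGet? ar (-1 - i)).getD "" == "#" then 1 else 0)
    else
      idx + (if (PySem.List.pyGet? ar (-1 - i)).getD "" == "#" then (2 : Int) else 0) ^ i.toNat) 0

-- ===== PORT B =====
-- '1' if c == '#' else '0', per element of ar
def pvBits (ar : List String) : List String :=
  ar.map (fun c => if c == "#" then "1" else "0")
-- int(s, 2): base-2 parse of the digit sequence, left to right (Horner)
def pvParseBin (digits : List String) : Int :=
  digits.foldl (fun acc d => 2 * acc + (if d == "1" then 1 else 0)) 0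
def convert_dots_and_hashtags_to_index_alt (ar : List String) : Int :=
  pvParseBin ("0" :: pvBits ar)

-- ===== PRECONDITION & SPEC =====
def Spec_convert_dots_and_hashtags_to_index (ar : List String) (out : Int) : Prop := out = convert_dots_and_hashtags_to_index_alt ar
instance (ar : List String) (out : Int) : Decidable (Spec_convert_dots_and_hashtags_to_index ar out) := by unfold Spec_convert_dots_and_hashtags_to_index; infer_instance

-- ===== CLAIM (what is proved, stated in full; the proofs are below) =====
def Claim_equal_convert_dots_and_hashtags_to_index : Prop := ∀ (ar : List String), Dom_convert_dots_and_hashtags_to_index ar → Spec_convert_dots_and_hashtags_to_index ar (convert_dots_and_hashtags_to_index ar)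

-- ===== LEMMAS AND PROOFS =====

-- common value: big-endian binary fold over ar with '#' as the 1-bit
def pvVal (ar : List String) : Int :=
  ar.foldl (fun a c => 2 * a + (if c == "#" then 1 else 0)) 0

theorem pvHorner_init (b : String → Int) (xs : List String) (a : Int) :
    xs.foldl (fun acc c => 2 * acc + b c) a
      = a * 2 ^ xs.length + xs.foldl (fun acc c => 2 * acc + b c) 0 := by
  induction xs generalizing a with
  | nil => simp
  | cons x xs ih =>
    simp only [List.foldl_cons, List.length_cons]
    rw [ih (2 * a + b x), ih (2 * 0 + b x)]
    ring

theorem pvAlt_eq_val (ar : List String) :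
    convert_dots_and_hashtags_to_index_alt ar = pvVal ar := by
  unfold convert_dots_and_hashtags_to_index_alt pvParseBin pvBits pvVal
  simp only [List.foldl_cons, List.foldl_map]
  norm_num
  apply PySem.List.foldl_congr_mem
  intro acc c _
  by_cases h : c == "#" <;> simp

theorem pvGet_shift (x : String) (xs : List String) (i : Int)
    (h0 : 0 ≤ i) (hn : i < xs.length) :
    PySem.List.pyGet? (x :: xs) (-1 - i) = PySem.List.pyGet? xs (-1 - i) := by
  have hk : -1 - i = -(((i + 1).toNat : Nat) : Int) := by omega
  rw [hk,
    PySem.List.pyGet?_neg_natCast _ _ (by omega) (by simpa using by omega),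
    PySem.List.pyGet?_neg_natCast _ _ (by omega) (by omega)]
  have h1 : (x :: xs).length - (i + 1).toNat = (xs.length - (i + 1).toNat) + 1 := by
    simp only [List.length_cons]; omega
  rw [h1, List.getElem?_cons_succ]

theorem pvA_eq_val (ar : List String) :
    convert_dots_and_hashtags_to_index ar = pvVal ar := by
  induction ar with
  | nil => rfl
  | cons x xs ih =>
    unfold convert_dots_and_hashtags_to_index at *
    have hlen : ((x :: xs).length : Int) = (xs.length : Int) + 1 := by
      simp
    rw [hlen, PySem.List.pyRange_one_succ_right (by positivity), List.foldl_append]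
    have hcongr :
        (PySem.List.pyRange 0 (xs.length : Int) 1).foldl
          (fun idx i =>
            if i == 0 then
              idx + (if (PySem.List.pyGet? (x :: xs) (-1 - i)).getD "" == "#" then 1 else 0)
            else
              idx + (if (PySem.List.pyGet? (x :: xs) (-1 - i)).getD "" == "#" then (2 : Int) else 0) ^ i.toNat) 0
        = (PySem.List.pyRange 0 (xs.length : Int) 1).foldl
          (fun idx i =>
            if i == 0 then
              idx + (if (PySem.List.pyGet? xs (-1 - i)).getD "" == "#" then 1 else 0)
            else
              idx + (if (PySem.List.pyGet? xs (-1 - i)).getD "" == "#" then (2 : Int) else 0) ^ i.toNat) 0 := by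
      apply PySem.List.foldl_congr_mem
      intro acc i hi
      rw [PySem.List.mem_pyRange_one] at hi
      rw [pvGet_shift x xs i hi.1 hi.2]
    rw [hcongr, ih]
    -- the last step adds the contribution of index xs.length, which accesses x
    have hx : PySem.List.pyGet? (x :: xs) (-1 - (xs.length : Int)) = some x := by
      have : -1 - (xs.length : Int) = -(((xs.length + 1 : Nat) : Nat) : Int) := by push_cast; ring
      rw [this, PySem.List.pyGet?_neg_natCast _ _ (by omega) (by simp)]
      simp
    -- pvVal (x :: xs) = bit x * 2^|xs| + pvVal xs
    have hv : pvVal (x :: xs)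
        = (if x == "#" then 1 else 0) * 2 ^ xs.length + pvVal xs := by
      unfold pvVal
      simp only [List.foldl_cons]
      rw [pvHorner_init (fun c => if c == "#" then 1 else 0) xs (2 * 0 + (if x == "#" then 1 else 0))]
      ring
    rw [hv]
    simp only [List.foldl_cons, List.foldl_nil, hx, Option.getD_some]
    by_cases hn : xs.length = 0
    · have hxs : xs = [] := List.eq_nil_of_length_eq_zero hn
      subst hxs
      by_cases hxx : x == "#" <;> simp [hxx, pvVal]
    · have hne : ((xs.length : Int) == 0) = false := by
        rw [beq_eq_false_iff_ne]
        exact Int.natCast_ne_zero.mpr hn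
      rw [hne]
      simp only [Bool.false_eq_true, if_false]
      have ht : ((xs.length : Int)).toNat = xs.length := by omega
      by_cases hxx : x == "#" <;> (simp [hxx, ht, zero_pow hn]; try ring)

-- ===== VERDICT (by name: the statement is the Claim_ definition above) =====
theorem convert_dots_and_hashtags_to_index_spec : Claim_equal_convert_dots_and_hashtags_to_index := by
  intro ar _
  unfold Spec_convert_dots_and_hashtags_to_index
  rw [pvA_eq_val, pvAlt_eq_val]
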